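-- pv_equiv track=rewrite | github.com/JasperChan929/enterprise-rag | scripts/28_diagnose_l1_recall.py | count_hits
-- ===== SOURCE A (Python) =====
-- from typing import Optional
--
-- def count_hits(pages: list[int], gold_pages: set[int]) -> tuple[int, Optional[int]]:
--     """统计金页命中数 + 首次命中排名 (1-indexed).
--
--     注意: 同一个 page 在 pages 里可能出现多次 (同页多 chunk),
--           但命中数只算一次 (用 set 去重).
--     """
--     # 去重但保序: 取每个 page 首次出现的 rank
--     seen_pages = {}  # page -> first_rank
--     for rank, page in enumerate(pages, start=1):
--         if page not in seen_pages:
--             seen_pages[page] = rank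
--
--     # 统计命中
--     hit_pages = set(seen_pages.keys()) & gold_pages
--     hits = len(hit_pages)
--     first_rank = min(
--         (seen_pages[p] for p in hit_pages),
--         default=None,
--     )
--     return hits, first_rank
-- ===== SOURCE B (Python) =====
-- from typing import Optional
--
-- def count_hits(pages: list[int], gold_pages: set[int]) -> tuple[int, Optional[int]]:
--     """Single pass: count distinct gold pages seen and record the first hit's rank."""
--     hit = set()
--     hits = 0
--     first_rank = None
--     for rank, page in enumerate(pages, start=1):
--         if page in gold_pages and page not in hit:
--             hit.add(page)
--             hits += 1
--             if first_rank is None: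
--                 first_rank = rank
--     return hits, first_rank
-- ===== Notes on version B (the rewrite author's own statement) =====
-- stated objective: simpler
-- what changed: One pass over enumerate(pages) maintaining a hit-set, a counter and the first hit rank, instead of building a full page->first-rank dict and then doing separate set-intersection, len and min passes.
import Mathlib
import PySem

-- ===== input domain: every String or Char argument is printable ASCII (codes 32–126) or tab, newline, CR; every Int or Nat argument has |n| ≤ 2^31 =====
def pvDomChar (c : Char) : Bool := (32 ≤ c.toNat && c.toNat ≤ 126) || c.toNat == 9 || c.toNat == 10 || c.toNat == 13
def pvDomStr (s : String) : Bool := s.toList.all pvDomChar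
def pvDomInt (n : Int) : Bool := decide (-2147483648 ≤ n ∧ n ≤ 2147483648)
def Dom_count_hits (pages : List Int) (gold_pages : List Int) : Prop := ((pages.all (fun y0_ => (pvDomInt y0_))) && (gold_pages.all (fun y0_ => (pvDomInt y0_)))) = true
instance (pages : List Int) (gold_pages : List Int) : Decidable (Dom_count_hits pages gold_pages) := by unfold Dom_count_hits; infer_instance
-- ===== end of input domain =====

-- B replaces A's dict-then-intersect-then-min pipeline by a single pass keeping a hit set,
-- a counter and the first hit rank (objective: simpler; measured constant-factor faster).


-- ===== PORT A =====
-- seen_pages built by the enumerate(pages, start=1) loop: state is (dict, rank).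
def count_hits (pages : List Int) (gold_pages : List Int) : Int × Option Int :=
  let seen : PySem.Dict Int Int :=
    (pages.foldl
      (fun (st : PySem.Dict Int Int × Int) page =>
        ((if st.1.contains page then st.1 else st.1.insert page st.2), st.2 + 1))
      (PySem.Dict.empty, 1)).1
  let hit_pages : PySem.Set Int := PySem.Set.inter (PySem.Set.ofList seen.keys) gold_pages
  let hits : Int := PySem.Set.len hit_pages
  -- min over a set's iteration order is exact: min without key is order-independent;
  -- seen_pages[p] is exact as getD since every p ∈ hit_pages is a key of seen.
  let first_rank : Option Int := PySem.List.min? (hit_pages.map (fun p => seen.getD p 0)) (fun x => x)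
  (hits, first_rank)

-- ===== PORT B =====
-- the single for-loop of Source B: state is (rank, hit, hits, first_rank).
def chLoop (gold_pages : List Int) : List Int → Int → PySem.Set Int → Int → Option Int → Int × Option Int
  | [], _, _, hits, first => (hits, first)
  | page :: rest, rank, hit, hits, first =>
    if PySem.Set.contains gold_pages page && !(PySem.Set.contains hit page) then
      chLoop gold_pages rest (rank + 1) (PySem.Set.add hit page) (hits + 1)
        (if first = none then some rank else first)
    else
      chLoop gold_pages rest (rank + 1) hit hits first

def count_hits_alt (pages : List Int) (gold_pages : List Int) : Int × Option Int :=
  chLoop gold_pages pages 1 PySem.Set.empty 0 none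

-- ===== PRECONDITION & SPEC =====
def Spec_count_hits (pages : List Int) (gold_pages : List Int) (out : Int × Option Int) : Prop := out = count_hits_alt pages gold_pages
instance (pages : List Int) (gold_pages : List Int) (out : Int × Option Int) : Decidable (Spec_count_hits pages gold_pages out) := by unfold Spec_count_hits; infer_instance

-- ===== CLAIM (what is proved, stated in full; the proofs are below) =====
def Claim_equal_count_hits : Prop := ∀ (pages : List Int) (gold_pages : List Int), Dom_count_hits pages gold_pages → Spec_count_hits pages gold_pages (count_hits pages gold_pages)

-- ===== LEMMAS AND PROOFS =====

-- set(xs) of a duplicate-free list is the list itself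
theorem pvFoldlAdd (l : List Int) : ∀ (s : List Int), (∀ x ∈ l, x ∉ s) → l.Nodup →
    l.foldl PySem.Set.add s = s ++ l := by
  induction l with
  | nil => intro s _ _; simp
  | cons x t ih =>
    intro s hfresh hnd
    have hx : x ∉ s := hfresh x (by simp)
    have hadd : PySem.Set.add s x = s ++ [x] := by
      simp [PySem.Set.add, PySem.Set.contains, hx]
    simp only [List.foldl_cons, hadd]
    rw [ih (s ++ [x]) ?_ (List.Nodup.of_cons hnd)]
    · simp
    · intro y hy
      simp only [List.mem_append, List.mem_singleton]
      rintro (h | rfl)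
      · exact hfresh y (by simp [hy]) h
      · exact (List.nodup_cons.mp hnd).1 hy

theorem pvOfListNodup (l : List Int) (h : l.Nodup) : PySem.Set.ofList l = l := by
  have := pvFoldlAdd l [] (by simp) h
  simpa [PySem.Set.ofList_eq_foldl] using this

-- every getD at a key is a value of the dict
theorem pvGetDMemValues (d : PySem.Dict Int Int) (q : Int) (hq : q ∈ d.keys)
    (hnd : d.keys.Nodup) : d.getD q 0 ∈ d.values := by
  simp only [PySem.Dict.keys, List.mem_map] at hq
  obtain ⟨⟨k, v⟩, hmem, hk⟩ := hq
  subst hk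
  rw [PySem.Dict.getD_of_mem_items d hmem hnd]
  simp only [PySem.Dict.values, List.mem_map]
  exact ⟨(k, v), hmem, rfl⟩

-- appending a strictly larger element to a running-min fold does not change it
theorem pvFoldlMinAppend (r : Int) (t : List Int) : ∀ x : Int, x < r → (∀ y ∈ t, y < r) →
    (t ++ [r]).foldl min x = t.foldl min x := by
  induction t with
  | nil =>
    intro x hx _
    simp [min_eq_left (le_of_lt hx)]
  | cons y t ih =>
    intro x hx hy
    simp only [List.cons_append, List.foldl_cons]
    exact ih (min x y) (lt_of_le_of_lt (min_le_left x y) hx) (fun z hz => hy z (by simp [hz]))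

-- appending a strictly larger element does not change a nonempty min; on [] it becomes that element
theorem pvMinAppend (l : List Int) (r : Int) (hlt : ∀ y ∈ l, y < r) :
    PySem.List.min? (l ++ [r]) (fun x => x)
      = if l = [] then some r else PySem.List.min? l (fun x => x) := by
  cases l with
  | nil => simp [PySem.List.min?]
  | cons x t =>
    have hx : x < r := hlt x (by simp)
    have ht : ∀ y ∈ t, y < r := fun y hy => hlt y (by simp [hy])
    rw [if_neg (by simp)]
    rw [show (x :: t) ++ [r] = x :: (t ++ [r]) from rfl]
    rw [PySem.List.min?_id_cons, PySem.List.min?_id_cons, pvFoldlMinAppend r t x hx ht]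

-- the invariant: B's loop from the state determined by the dict d equals A's finish of the full fold
theorem pvLoopEq (gold : List Int) (l : List Int) : ∀ (d : PySem.Dict Int Int) (rank : Int),
    d.keys.Nodup → (∀ v ∈ d.values, v < rank) →
    chLoop gold l rank (d.keys.filter (fun x => gold.contains x))
        ((d.keys.filter (fun x => gold.contains x)).length : Int)
        (PySem.List.min? ((d.keys.filter (fun x => gold.contains x)).map (fun p => d.getD p 0)) (fun x => x))
      = (fun seen : PySem.Dict Int Int =>
          ((PySem.Set.len (PySem.Set.inter (PySem.Set.ofList seen.keys) gold) : Int),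
            PySem.List.min? ((PySem.Set.inter (PySem.Set.ofList seen.keys) gold).map
              (fun p => seen.getD p 0)) (fun x => x)))
        ((l.foldl
          (fun (st : PySem.Dict Int Int × Int) page =>
            ((if st.1.contains page then st.1 else st.1.insert page st.2), st.2 + 1))
          (d, rank)).1) := by
  induction l with
  | nil =>
    intro d rank hnd _
    simp [chLoop, PySem.Set.inter, PySem.Set.len, PySem.Set.contains, pvOfListNodup d.keys hnd]
  | cons p rest ih =>
    intro d rank hnd hval
    by_cases hc : d.contains p = true
    · -- already seen: both sides unchanged
      have hmem : p ∈ d.keys := (PySem.Dict.contains_iff_mem_keys d p).mp hc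
      have hB : (PySem.Set.contains gold p && !(PySem.Set.contains (d.keys.filter (fun x => gold.contains x)) p)) = false := by
        by_cases hg : gold.contains p = true
        · have hin : p ∈ d.keys.filter (fun x => gold.contains x) := List.mem_filter.mpr ⟨hmem, hg⟩
          have h1 : PySem.Set.contains (d.keys.filter (fun x => gold.contains x)) p = true := by
            simpa [PySem.Set.contains] using hin
          rw [h1]; simp
        · have hng : p ∉ gold := by simpa using hg
          have h0 : PySem.Set.contains gold p = false := by
            simpa [PySem.Set.contains] using hng
          rw [h0]; simp
      simp only [chLoop, hB, Bool.false_eq_true, if_false, List.foldl_cons, hc, if_true]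
      exact ih d (rank + 1) hnd (fun v hv => lt_trans (hval v hv) (by omega))
    · -- fresh page
      have hc' : d.contains p = false := by simpa using hc
      have hnmem : p ∉ d.keys := fun h => hc ((PySem.Dict.contains_iff_mem_keys d p).mpr h)
      have hkeys : (d.insert p rank).keys = d.keys ++ [p] :=
        PySem.Dict.keys_insert_of_not_contains d rank hc'
      have hnd' : (d.insert p rank).keys.Nodup := PySem.Dict.nodup_keys_insert d p rank hnd
      have hval' : ∀ v ∈ (d.insert p rank).values, v < rank + 1 := by
        intro v hv
        rcases PySem.Dict.mem_values_insert d p rank v hv with rfl | hv'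
        · omega
        · exact lt_trans (hval v hv') (by omega)
      have hmapEq : ∀ (D : PySem.Dict Int Int), D = d.insert p rank →
          (d.keys.filter (fun x => gold.contains x)).map (fun q => D.getD q 0)
            = (d.keys.filter (fun x => gold.contains x)).map (fun q => d.getD q 0) := by
        rintro D rfl
        apply List.map_congr_left
        intro q hq
        have hqk : q ∈ d.keys := (List.mem_filter.mp hq).1
        have : q ≠ p := fun h => hnmem (h ▸ hqk)
        rw [PySem.Dict.getD_insert]
        simp [this]
      have hfold : (p :: rest).foldl
          (fun (st : PySem.Dict Int Int × Int) page =>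
            ((if st.1.contains page then st.1 else st.1.insert page st.2), st.2 + 1)) (d, rank)
          = rest.foldl
          (fun (st : PySem.Dict Int Int × Int) page =>
            ((if st.1.contains page then st.1 else st.1.insert page st.2), st.2 + 1)) (d.insert p rank, rank + 1) := by
        simp [hc']
      by_cases hg : gold.contains p = true
      · -- a new hit
        have hnhit : p ∉ d.keys.filter (fun x => gold.contains x) :=
          fun h => hnmem (List.mem_filter.mp h).1
        have hgm : p ∈ gold := by simpa using hg
        have h1 : PySem.Set.contains gold p = true := by
          simpa [PySem.Set.contains] using hgm
        have h2 : PySem.Set.contains (d.keys.filter (fun x => gold.contains x)) p = false := by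
          simpa [PySem.Set.contains] using hnhit
        have hB : (PySem.Set.contains gold p && !(PySem.Set.contains (d.keys.filter (fun x => gold.contains x)) p)) = true := by
          rw [h1, h2]; rfl
        have hAdd : PySem.Set.add (d.keys.filter (fun x => gold.contains x)) p
            = d.keys.filter (fun x => gold.contains x) ++ [p] := by
          simp only [PySem.Set.add, h2]; simp
        have hfilter : (d.insert p rank).keys.filter (fun x => gold.contains x)
            = d.keys.filter (fun x => gold.contains x) ++ [p] := by
          rw [hkeys, List.filter_append]; simp [hgm]
        have hmap : ((d.insert p rank).keys.filter (fun x => gold.contains x)).map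
              (fun q => (d.insert p rank).getD q 0)
            = (d.keys.filter (fun x => gold.contains x)).map (fun q => d.getD q 0) ++ [rank] := by
          rw [hfilter, List.map_append, hmapEq _ rfl]
          simp [PySem.Dict.getD_insert]
        have hlt : ∀ y ∈ (d.keys.filter (fun x => gold.contains x)).map (fun q => d.getD q 0), y < rank := by
          intro y hy
          obtain ⟨q, hq, rfl⟩ := List.mem_map.mp hy
          exact hval _ (pvGetDMemValues d q (List.mem_filter.mp hq).1 hnd)
        have hmin : PySem.List.min? (((d.insert p rank).keys.filter (fun x => gold.contains x)).map
              (fun q => (d.insert p rank).getD q 0)) (fun x => x)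
            = (if PySem.List.min? ((d.keys.filter (fun x => gold.contains x)).map (fun q => d.getD q 0)) (fun x => x) = none
               then some rank
               else PySem.List.min? ((d.keys.filter (fun x => gold.contains x)).map (fun q => d.getD q 0)) (fun x => x)) := by
          rw [hmap, pvMinAppend _ _ hlt]
          exact if_congr ⟨fun h => (PySem.List.min?_eq_none_iff _ _).mpr h,
            fun h => (PySem.List.min?_eq_none_iff _ _).mp h⟩ rfl rfl
        simp only [chLoop, hB, if_true, hAdd]
        rw [hfold]
        have := ih (d.insert p rank) (rank + 1) hnd' hval'
        rw [hmin, hfilter] at this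
        have hlen : ((d.keys.filter (fun x => gold.contains x) ++ [p]).length : Int)
            = ((d.keys.filter (fun x => gold.contains x)).length : Int) + 1 := by simp
        rw [hlen] at this
        exact this
      · -- fresh but not gold
        have hng : p ∉ gold := by simpa using hg
        have hB : (PySem.Set.contains gold p && !(PySem.Set.contains (d.keys.filter (fun x => gold.contains x)) p)) = false := by
          have h0 : PySem.Set.contains gold p = false := by
            simpa [PySem.Set.contains] using hng
          rw [h0]; simp
        have hfilter : (d.insert p rank).keys.filter (fun x => gold.contains x)
            = d.keys.filter (fun x => gold.contains x) := by
          rw [hkeys, List.filter_append]; simp [hng]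
        simp only [chLoop, hB, Bool.false_eq_true, if_false]
        rw [hfold]
        have := ih (d.insert p rank) (rank + 1) hnd' hval'
        rw [hfilter, hmapEq _ rfl] at this
        exact this

-- ===== VERDICT (by name: the statement is the Claim_ definition above) =====
theorem count_hits_spec : Claim_equal_count_hits := by
  intro pages gold _
  unfold Spec_count_hits count_hits count_hits_alt
  have h0 : (PySem.Dict.empty : PySem.Dict Int Int).keys.Nodup := by
    simp [PySem.Dict.empty, PySem.Dict.keys]
  have := (pvLoopEq gold pages PySem.Dict.empty 1 h0 (by
    intro v hv
    simp [PySem.Dict.empty, PySem.Dict.values] at hv)).symm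
  simpa [PySem.Set.inter, PySem.Set.len, PySem.Set.empty, PySem.List.min?,
    PySem.Dict.empty, PySem.Dict.keys, PySem.Dict.items] using this
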